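-- pv_equiv track=rewrite | github.com/tamias23/lobby202511 | display_board.py | get_polys_within_distance_jump
-- ===== SOURCE A (Python) =====
-- from collections import deque
--
-- def get_polys_within_distance_jump(polygons, start, max_dist):
--     visited = {start}
--     queue = deque([(start, 0)])
--     while queue:
--         curr, dist = queue.popleft()
--         if dist < max_dist:
--             poly_data = polygons.get(curr, {})
--             neighbors = poly_data.get("neighbors", poly_data.get("neighbours", []))
--             for n in neighbors:
--                 if n not in visited:
--                     visited.add(n)
--                     queue.append((n, dist + 1))
--     return visited
-- ===== SOURCE B (Python) =====
-- def get_polys_within_distance_jump(polygons, start, max_dist):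
--     # Bellman-Ford-style saturation: keep a distance map and rescan the whole
--     # map each round, relaxing edges, until a full pass adds nothing.
--     dist = {start: 0}
--     changed = True
--     while changed:
--         changed = False
--         for u, d in list(dist.items()):
--             if d < max_dist:
--                 poly_data = polygons.get(u, {})
--                 for n in poly_data.get("neighbors", poly_data.get("neighbours", [])):
--                     if n not in dist:
--                         dist[n] = d + 1
--                         changed = True
--     return set(dist)
-- ===== Notes on version B (the rewrite author's own statement) =====
-- stated objective: alternative
-- what changed: Replaced BFS with a deque of (node, distance) pairs by Bellman-Ford-style saturation: a distance map relaxed by rescanning the whole map each round until a full pass adds nothing; no queue or frontier exists.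
import Mathlib
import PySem

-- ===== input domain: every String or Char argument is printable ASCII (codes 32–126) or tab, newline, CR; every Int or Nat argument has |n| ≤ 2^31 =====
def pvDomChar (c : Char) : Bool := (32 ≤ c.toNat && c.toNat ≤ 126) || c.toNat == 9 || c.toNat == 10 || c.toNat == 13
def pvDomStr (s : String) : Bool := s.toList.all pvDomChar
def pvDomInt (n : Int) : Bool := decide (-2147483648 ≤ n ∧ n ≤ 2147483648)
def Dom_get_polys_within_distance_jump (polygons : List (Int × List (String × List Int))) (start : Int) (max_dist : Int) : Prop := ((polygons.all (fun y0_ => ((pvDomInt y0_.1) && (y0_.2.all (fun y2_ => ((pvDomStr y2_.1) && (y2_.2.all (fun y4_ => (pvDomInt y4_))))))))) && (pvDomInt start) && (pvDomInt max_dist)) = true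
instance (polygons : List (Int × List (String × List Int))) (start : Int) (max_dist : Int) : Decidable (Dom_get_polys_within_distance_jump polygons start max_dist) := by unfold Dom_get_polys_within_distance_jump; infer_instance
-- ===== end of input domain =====

-- B replaces A's deque-based BFS by Bellman-Ford-style saturation: a distance map
-- rescanned in full each round until a pass adds nothing (objective: alternative).

-- ===== PORT A =====
-- shared helper: polygons.get(curr, {}) then .get("neighbors", .get("neighbours", [])) —
-- the identical expression occurs verbatim in both Pythons
def pvNbrs (polygons : List (Int × List (String × List Int))) (curr : Int) : List Int :=
  let poly_data := PySem.Dict.getD (PySem.Dict.mk polygons) curr []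
  PySem.Dict.getD (PySem.Dict.mk poly_data) "neighbors"
    (PySem.Dict.getD (PySem.Dict.mk poly_data) "neighbours" [])

-- body of A's inner 'for n in neighbors' loop (state: visited set, queue)
def pvStepA (dist : Int) (s : PySem.Set Int × List (Int × Int)) (n : Int) :
    PySem.Set Int × List (Int × Int) :=
  if n ∈ s.1 then s else (PySem.Set.add s.1 n, s.2 ++ [(n, dist + 1)])

-- all ints that can ever be added (termination measure universe)
def pvNodes (polygons : List (Int × List (String × List Int))) : List Int :=
  polygons.flatMap (fun p => p.2.flatMap (fun kv => kv.2))

-- termination lemmas (cited by the decreasing_by of both ports' loops)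
theorem pvNbrs_sub (polygons : List (Int × List (String × List Int))) (curr n : Int)
    (h : n ∈ pvNbrs polygons curr) : n ∈ pvNodes polygons := by
  unfold pvNbrs at h
  unfold pvNodes
  set pd := PySem.Dict.getD (PySem.Dict.mk polygons) curr [] with hpddef
  have h1 : ∃ k v, PySem.Dict.get? (PySem.Dict.mk pd) k = some v ∧ n ∈ v := by
    rcases hA : PySem.Dict.get? (PySem.Dict.mk pd) "neighbors" with _ | w
    · rw [PySem.Dict.getD_eq_get?_getD, hA] at h
      simp only [Option.getD_none] at h
      rcases hB : PySem.Dict.get? (PySem.Dict.mk pd) "neighbours" with _ | w'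
      · rw [PySem.Dict.getD_eq_get?_getD, hB] at h
        simp at h
      · rw [PySem.Dict.getD_eq_get?_getD, hB] at h
        exact ⟨_, _, hB, h⟩
    · rw [PySem.Dict.getD_eq_get?_getD, hA] at h
      exact ⟨_, _, hA, h⟩
  obtain ⟨k, v, hk, hn⟩ := h1
  rcases hg : PySem.Dict.get? (PySem.Dict.mk polygons) curr with _ | pdl
  · have hpd0 : pd = [] := by rw [hpddef, PySem.Dict.getD_eq_get?_getD, hg]; rfl
    rw [hpd0] at hk
    simp [PySem.Dict.get?] at hk
  · have hpd2 : pd = pdl := by rw [hpddef, PySem.Dict.getD_eq_get?_getD, hg]; rfl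
    have hmem : (curr, pdl) ∈ polygons := PySem.Dict.mem_items_of_get?_eq_some _ hg
    have hkv : (k, v) ∈ pdl := by
      rw [hpd2] at hk
      exact PySem.Dict.mem_items_of_get?_eq_some _ hk
    exact List.mem_flatMap.mpr ⟨(curr, pdl), hmem, List.mem_flatMap.mpr ⟨(k, v), hkv, hn⟩⟩

theorem pvFilter_len_le {α : Type} (p q : α → Bool) (l : List α)
    (h : ∀ a, q a = true → p a = true) : (l.filter q).length ≤ (l.filter p).length := by
  induction l with
  | nil => simp
  | cons a l ih =>
    simp only [List.filter_cons]
    by_cases hq : q a = true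
    · rw [if_pos hq, if_pos (h a hq)]
      simpa using ih
    · rw [if_neg hq]
      by_cases hp : p a = true
      · rw [if_pos hp]
        exact le_trans ih (by simp)
      · rw [if_neg hp]
        exact ih

theorem pvFilter_len_lt {α : Type} (p q : α → Bool) (l : List α)
    (h : ∀ a, q a = true → p a = true) (x : α) (hx : x ∈ l)
    (hq : q x = false) (hp : p x = true) :
    (l.filter q).length < (l.filter p).length := by
  induction l with
  | nil => cases hx
  | cons a l ih =>
    simp only [List.filter_cons]
    rcases List.mem_cons.mp hx with rfl | hx'
    · rw [if_neg (by simp [hq]), if_pos hp]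
      have hle := pvFilter_len_le p q l h
      simp only [List.length_cons]
      omega
    · by_cases hqa : q a = true
      · rw [if_pos hqa, if_pos (h a hqa)]
        have := ih hx'
        simp only [List.length_cons]
        omega
      · rw [if_neg hqa]
        by_cases hpa : p a = true
        · rw [if_pos hpa]
          have := ih hx'
          simp only [List.length_cons]
          omega
        · rw [if_neg hpa]
          exact ih hx'

theorem pvStepA_growth (dist : Int) (ns : List Int) :
    ∀ (v : PySem.Set Int) (q : List (Int × Int)),
      (∀ a, a ∈ v → a ∈ (ns.foldl (pvStepA dist) (v, q)).1) ∧
      (ns.foldl (pvStepA dist) (v, q) = (v, q) ∨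
        ∃ x, x ∈ ns ∧ x ∉ v ∧ x ∈ (ns.foldl (pvStepA dist) (v, q)).1) := by
  induction ns with
  | nil => intro v q; exact ⟨fun a ha => ha, Or.inl rfl⟩
  | cons n ns ih =>
    intro v q
    by_cases hm : n ∈ v
    · simp only [List.foldl_cons, pvStepA, if_pos hm]
      obtain ⟨ihm, ihc⟩ := ih v q
      refine ⟨ihm, ?_⟩
      rcases ihc with heq | ⟨x, hxn, hxv, hxs⟩
      · exact Or.inl heq
      · exact Or.inr ⟨x, List.mem_cons_of_mem _ hxn, hxv, hxs⟩
    · simp only [List.foldl_cons, pvStepA, if_neg hm]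
      obtain ⟨ihm, _⟩ := ih (PySem.Set.add v n) (q ++ [(n, dist + 1)])
      have hn : n ∈ (ns.foldl (pvStepA dist) (PySem.Set.add v n, q ++ [(n, dist + 1)])).1 :=
        ihm n ((PySem.Set.mem_add _ _ _).mpr (Or.inr rfl))
      refine ⟨fun a ha => ihm a ((PySem.Set.mem_add _ _ _).mpr (Or.inl ha)), ?_⟩
      exact Or.inr ⟨n, List.mem_cons_self, hm, hn⟩

-- A's while-loop (queue of (node, dist) pairs); terminates because visited can only grow
-- inside pvNodes, and otherwise the queue shrinks
def loopA (polygons : List (Int × List (String × List Int))) (max_dist : Int)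
    (visited : PySem.Set Int) (queue : List (Int × Int)) : PySem.Set Int :=
  match queue with
  | [] => visited
  | (curr, dist) :: rest =>
    if dist < max_dist then
      let st := (pvNbrs polygons curr).foldl (pvStepA dist) (visited, rest)
      loopA polygons max_dist st.1 st.2
    else
      loopA polygons max_dist visited rest
termination_by ((((pvNodes polygons).filter (fun x => decide (x ∉ visited))).length, queue.length) : Nat × Nat)
decreasing_by
  · obtain ⟨hmono, hcase⟩ := pvStepA_growth dist (pvNbrs polygons curr) visited rest
    rcases hcase with heq | ⟨x, hxn, hxv, hxs⟩
    · rw [heq]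
      exact Prod.Lex.right _ (by simp)
    · apply Prod.Lex.left
      refine pvFilter_len_lt _ _ _ ?_ x (pvNbrs_sub polygons curr x hxn) (by simp [hxs]) (by simp [hxv])
      intro a ha
      simp only [decide_eq_true_eq] at ha ⊢
      exact fun hav => ha (hmono a hav)
  · exact Prod.Lex.right _ (by simp)

def get_polys_within_distance_jump (polygons : List (Int × List (String × List Int)))
    (start : Int) (max_dist : Int) : List Int :=
  loopA polygons max_dist (PySem.Set.ofList [start]) [(start, 0)]

-- ===== PORT B =====
-- B's distance dict is an assoc list (insertion order); every insert in Source B is on a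
-- fresh key, so 'dist[n] = d + 1' appends, and 'n not in dist' tests the key list.
-- body of B's inner 'for n in …' loop (state: dist assoc list, changed flag)
def satStep (d : Int) (s : List (Int × Int) × Bool) (n : Int) : List (Int × Int) × Bool :=
  if (s.1.map Prod.fst).contains n then s else (s.1 ++ [(n, d + 1)], true)

-- body of B's 'for u, d in list(dist.items())' loop
def satItem (polygons : List (Int × List (String × List Int))) (max_dist : Int)
    (s : List (Int × Int) × Bool) (p : Int × Int) : List (Int × Int) × Bool :=
  if p.2 < max_dist then (pvNbrs polygons p.1).foldl (satStep p.2) s else s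

-- termination lemma for loopSat: one pass only appends fresh keys drawn from pvNodes
theorem satStepFold_ext (d : Int) (ns : List Int) :
    ∀ (s : List (Int × Int) × Bool), ∃ ext,
      ns.foldl (satStep d) s = (s.1 ++ ext, s.2 || !ext.isEmpty) ∧
      (∀ p, p ∈ ext → p.1 ∈ ns ∧ p.1 ∉ s.1.map Prod.fst) := by
  induction ns with
  | nil => intro s; exact ⟨[], by simp, by simp⟩
  | cons n ns ih =>
    intro s
    by_cases hm : (s.1.map Prod.fst).contains n = true
    · simp only [List.foldl_cons, satStep, if_pos hm]
      obtain ⟨ext, he, hp⟩ := ih s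
      exact ⟨ext, he, fun p hpe => ⟨List.mem_cons_of_mem _ (hp p hpe).1, (hp p hpe).2⟩⟩
    · simp only [List.foldl_cons, satStep, if_neg hm]
      obtain ⟨ext, he, hp⟩ := ih (s.1 ++ [(n, d + 1)], true)
      refine ⟨(n, d + 1) :: ext, ?_, ?_⟩
      · rw [he]; simp
      · intro p hpe
        rcases List.mem_cons.mp hpe with rfl | hpe'
        · exact ⟨List.mem_cons_self, by simpa using hm⟩
        · obtain ⟨h1, h2⟩ := hp p hpe'
          refine ⟨List.mem_cons_of_mem _ h1, fun hc => h2 ?_⟩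
          simp only [List.map_append] at h2 ⊢
          exact List.mem_append_left _ hc
  
theorem satFold_ext (polygons : List (Int × List (String × List Int))) (max_dist : Int)
    (items : List (Int × Int)) :
    ∀ (s : List (Int × Int) × Bool), ∃ ext,
      items.foldl (satItem polygons max_dist) s = (s.1 ++ ext, s.2 || !ext.isEmpty) ∧
      (∀ p, p ∈ ext → p.1 ∈ pvNodes polygons ∧ p.1 ∉ s.1.map Prod.fst) := by
  induction items with
  | nil => intro s; exact ⟨[], by simp, by simp⟩
  | cons it items ih =>
    intro s
    by_cases hd : it.2 < max_dist
    · simp only [List.foldl_cons, satItem, if_pos hd]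
      obtain ⟨e0, he0, hp0⟩ := satStepFold_ext it.2 (pvNbrs polygons it.1) s
      rw [he0]
      obtain ⟨e1, he1, hp1⟩ := ih (s.1 ++ e0, s.2 || !e0.isEmpty)
      refine ⟨e0 ++ e1, ?_, ?_⟩
      · rw [he1]
        simp only [List.append_assoc]
        cases e0 <;> simp
      · intro p hpe
        rcases List.mem_append.mp hpe with hpe0 | hpe1
        · exact ⟨pvNbrs_sub polygons it.1 p.1 (hp0 p hpe0).1, (hp0 p hpe0).2⟩
        · obtain ⟨h1, h2⟩ := hp1 p hpe1
          refine ⟨h1, fun hc => h2 ?_⟩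
          simp only [List.map_append]
          exact List.mem_append_left _ hc
    · simp only [List.foldl_cons, satItem, if_neg hd]
      exact ih s

-- B's 'while changed' loop: one full relaxation pass over the whole map per round
def loopSat (polygons : List (Int × List (String × List Int))) (max_dist : Int)
    (dist : List (Int × Int)) : List (Int × Int) :=
  let r := dist.foldl (satItem polygons max_dist) (dist, false)
  if h : r.2 = true then loopSat polygons max_dist r.1 else r.1
termination_by (((pvNodes polygons).filter (fun x => decide (x ∉ dist.map Prod.fst))).length : Nat)
decreasing_by
  simp only [r, List.foldl_attach] at h ⊢
  obtain ⟨ext, he, hp⟩ := satFold_ext polygons max_dist dist (dist, false)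
  rw [he] at h ⊢
  simp only [Bool.false_or] at h
  rcases hext : ext with _ | ⟨p0, ext'⟩
  · rw [hext] at h; simp at h
  · obtain ⟨h1, h2⟩ := hp p0 (hext ▸ List.mem_cons_self)
    refine pvFilter_len_lt _ _ _ ?_ p0.1 h1 ?_ (by simpa using h2)
    · intro a ha
      simp only [decide_eq_true_eq, List.map_append] at ha ⊢
      exact fun hav => ha (List.mem_append_left _ hav)
    · simp only [decide_eq_false_iff_not, not_not, List.map_append]
      exact List.mem_append_right _ (by simp)

def get_polys_within_distance_jump_alt (polygons : List (Int × List (String × List Int)))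
    (start : Int) (max_dist : Int) : List Int :=
  PySem.Set.ofList ((loopSat polygons max_dist [(start, 0)]).map Prod.fst)

-- ===== PRECONDITION & SPEC =====
def Spec_get_polys_within_distance_jump (polygons : List (Int × List (String × List Int))) (start : Int) (max_dist : Int) (out : List Int) : Prop := out = get_polys_within_distance_jump_alt polygons start max_dist
instance (polygons : List (Int × List (String × List Int))) (start : Int) (max_dist : Int) (out : List Int) : Decidable (Spec_get_polys_within_distance_jump polygons start max_dist out) := by unfold Spec_get_polys_within_distance_jump; infer_instance

-- ===== CLAIM (what is proved, stated in full; the proofs are below) =====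
def Claim_equal_get_polys_within_distance_jump : Prop := ∀ (polygons : List (Int × List (String × List Int))) (start : Int) (max_dist : Int), Dom_get_polys_within_distance_jump polygons start max_dist → Spec_get_polys_within_distance_jump polygons start max_dist (get_polys_within_distance_jump polygons start max_dist)

-- ===== LEMMAS AND PROOFS =====

-- A-side frontier machinery: body of a level-synchronous neighbor step and level fold
def pvStepB (s : PySem.Set Int × List Int) (n : Int) : PySem.Set Int × List Int :=
  if n ∈ s.1 then s else (PySem.Set.add s.1 n, s.2 ++ [n])

def pvInner (polygons : List (Int × List (String × List Int)))
    (s : PySem.Set Int × List Int) (node : Int) : PySem.Set Int × List Int :=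
  (pvNbrs polygons node).foldl pvStepB s

-- A's neighbor fold on a queue 'q ++ a.map (·, d+1)' is the frontier neighbor fold on (v, a)
theorem pv_inner_shift (dist : Int) (ns : List Int) :
    ∀ (v : PySem.Set Int) (q : List (Int × Int)) (a : List Int),
      ns.foldl (pvStepA dist) (v, q ++ a.map (fun c => (c, dist + 1))) =
      ((ns.foldl pvStepB (v, a)).1,
        q ++ (ns.foldl pvStepB (v, a)).2.map (fun c => (c, dist + 1))) := by
  induction ns with
  | nil => intro v q a; rfl
  | cons n ns ih =>
    intro v q a
    by_cases hm : n ∈ v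
    · simp only [List.foldl_cons, pvStepA, pvStepB, if_pos hm]
      exact ih v q a
    · simp only [List.foldl_cons, pvStepA, pvStepB, if_neg hm]
      have : (q ++ a.map (fun c => (c, dist + 1))) ++ [(n, dist + 1)] =
          q ++ (a ++ [n]).map (fun c => (c, dist + 1)) := by
        simp
      rw [this]
      exact ih (PySem.Set.add v n) q (a ++ [n])

-- processing one whole BFS level of A's queue is one 'pvInner' fold
theorem pv_loopA_level (polygons : List (Int × List (String × List Int))) (max_dist dist : Int)
    (hd : dist < max_dist) (cur : List Int) :
    ∀ (nxt : List Int) (v : PySem.Set Int),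
      loopA polygons max_dist v
        (cur.map (fun c => (c, dist)) ++ nxt.map (fun c => (c, dist + 1))) =
      loopA polygons max_dist (cur.foldl (pvInner polygons) (v, nxt)).1
        ((cur.foldl (pvInner polygons) (v, nxt)).2.map (fun c => (c, dist + 1))) := by
  induction cur with
  | nil => intro nxt v; rfl
  | cons c cs ih =>
    intro nxt v
    rw [List.map_cons, List.cons_append, loopA, if_pos hd]
    simp only [List.foldl_cons]
    rw [pv_inner_shift dist (pvNbrs polygons c) v (cs.map (fun c => (c, dist))) nxt]
    exact ih ((pvNbrs polygons c).foldl pvStepB (v, nxt)).2 ((pvNbrs polygons c).foldl pvStepB (v, nxt)).1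

theorem pv_loopA_dead (polygons : List (Int × List (String × List Int))) (max_dist dist : Int)
    (hd : ¬ dist < max_dist) (f : List Int) :
    ∀ (v : PySem.Set Int), loopA polygons max_dist v (f.map (fun c => (c, dist))) = v := by
  induction f with
  | nil => intro v; rw [List.map_nil, loopA]
  | cons c cs ih =>
    intro v
    rw [List.map_cons, loopA, if_neg hd]
    exact ih v

-- loopSat, with its WF-recursion attach fold unfolded to a plain fold
theorem loopSat_eq (polygons : List (Int × List (String × List Int))) (max_dist : Int)
    (dist : List (Int × Int)) :
    loopSat polygons max_dist dist =
      (if (dist.foldl (satItem polygons max_dist) (dist, false)).2 = true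
        then loopSat polygons max_dist (dist.foldl (satItem polygons max_dist) (dist, false)).1
        else (dist.foldl (satItem polygons max_dist) (dist, false)).1) := by
  rw [loopSat]
  simp only [dite_eq_ite]

-- a pass over items whose neighbors are all already keyed changes nothing
theorem satStepFold_noop (d : Int) (ns : List Int) :
    ∀ (s : List (Int × Int) × Bool), (∀ n ∈ ns, n ∈ s.1.map Prod.fst) →
      ns.foldl (satStep d) s = s := by
  induction ns with
  | nil => intro s _; rfl
  | cons n ns ih =>
    intro s h
    have hc : (s.1.map Prod.fst).contains n = true := by
      simpa using h n List.mem_cons_self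
    simp only [List.foldl_cons, satStep, if_pos hc]
    exact ih s (fun m hm => h m (List.mem_cons_of_mem _ hm))

theorem satFold_noop (polygons : List (Int × List (String × List Int))) (max_dist : Int)
    (items : List (Int × Int)) :
    ∀ (s : List (Int × Int) × Bool),
      (∀ p ∈ items, p.2 < max_dist → ∀ n ∈ pvNbrs polygons p.1, n ∈ s.1.map Prod.fst) →
      items.foldl (satItem polygons max_dist) s = s := by
  induction items with
  | nil => intro s _; rfl
  | cons it items ih =>
    intro s h
    have hstep : satItem polygons max_dist s it = s := by
      unfold satItem
      split_ifs with hd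
      · exact satStepFold_noop it.2 (pvNbrs polygons it.1) s (h it List.mem_cons_self hd)
      · rfl
    simp only [List.foldl_cons, hstep]
    exact ih s (fun p hp => h p (List.mem_cons_of_mem _ hp))

theorem pv_add_not_mem {l : List Int} {n : Int} (h : n ∉ l) :
    PySem.Set.add l n = l ++ [n] := by
  simp [PySem.Set.add, PySem.Set.contains, h]

-- B's neighbor fold on (L, c) is A's frontier neighbor fold on (keys L, a): both append
-- the same fresh nodes 'ext'
theorem satStepB_corr (d : Int) (ns : List Int) :
    ∀ (L : List (Int × Int)) (c : Bool) (a : List Int),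
      ∃ ext : List Int,
        ns.foldl (satStep d) (L, c) = (L ++ ext.map (fun n => (n, d + 1)), c || !ext.isEmpty) ∧
        ns.foldl pvStepB (L.map Prod.fst, a) = (L.map Prod.fst ++ ext, a ++ ext) ∧
        (∀ x ∈ ext, x ∈ ns) ∧ (∀ x ∈ ext, x ∉ L.map Prod.fst) ∧ ext.Nodup ∧
        (∀ n ∈ ns, n ∈ L.map Prod.fst ++ ext) := by
  induction ns with
  | nil => intro L c a; exact ⟨[], by simp, by simp, by simp, by simp, by simp, by simp⟩
  | cons n ns ih =>
    intro L c a
    by_cases hm : n ∈ L.map Prod.fst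
    · have hc : (L.map Prod.fst).contains n = true := by simpa using hm
      simp only [List.foldl_cons, satStep, pvStepB, if_pos hc, if_pos hm]
      obtain ⟨ext, h1, h2, h3, h4, h5, h6⟩ := ih L c a
      refine ⟨ext, h1, h2, fun x hx => List.mem_cons_of_mem _ (h3 x hx), h4, h5, ?_⟩
      intro m hmm
      rcases List.mem_cons.mp hmm with rfl | hmm'
      · exact List.mem_append_left _ hm
      · exact h6 m hmm'
    · have hc : ¬ (L.map Prod.fst).contains n = true := by simpa using hm
      simp only [List.foldl_cons, satStep, pvStepB, if_neg hc, if_neg hm]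
      rw [pv_add_not_mem hm]
      have hkey : L.map Prod.fst ++ [n] = (L ++ [(n, d + 1)]).map Prod.fst := by simp
      rw [hkey]
      obtain ⟨ext, h1, h2, h3, h4, h5, h6⟩ := ih (L ++ [(n, d + 1)]) true (a ++ [n])
      refine ⟨n :: ext, ?_, ?_, ?_, ?_, ?_, ?_⟩
      · rw [h1]; simp
      · rw [h2]; simp [← hkey]
      · intro x hx
        rcases List.mem_cons.mp hx with rfl | hx'
        · exact List.mem_cons_self
        · exact List.mem_cons_of_mem _ (h3 x hx')
      · intro x hx
        rcases List.mem_cons.mp hx with rfl | hx'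
        · exact hm
        · intro hxl
          exact h4 x hx' (by rw [← hkey]; exact List.mem_append_left _ hxl)
      · refine List.nodup_cons.mpr ⟨fun hne => ?_, h5⟩
        exact h4 n hne (by rw [← hkey]; simp)
      · intro m hmm
        rcases List.mem_cons.mp hmm with rfl | hmm'
        · simp
        · have := h6 m hmm'
          rw [← hkey] at this
          rcases List.mem_append.mp this with hl | hr
          · rcases List.mem_append.mp hl with h' | h'
            · exact List.mem_append_left _ h'
            · simp at h'
              exact List.mem_append_right _ (by simp [h'])
          · exact List.mem_append_right _ (List.mem_cons_of_mem _ hr)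

-- one full relaxation round over a frontier F at depth k (< max_dist) appends exactly
-- the new nodes 'ext' that A's level expansion appends, in the same order
theorem satLevel (polygons : List (Int × List (String × List Int))) (max_dist k : Int)
    (hk : k < max_dist) (F : List Int) :
    ∀ (L : List (Int × Int)) (c : Bool) (a : List Int),
      ∃ ext : List Int,
        (F.map (fun f => (f, k))).foldl (satItem polygons max_dist) (L, c) =
          (L ++ ext.map (fun n => (n, k + 1)), c || !ext.isEmpty) ∧
        F.foldl (pvInner polygons) (L.map Prod.fst, a) = (L.map Prod.fst ++ ext, a ++ ext) ∧
        (∀ x ∈ ext, x ∈ pvNodes polygons) ∧ (∀ x ∈ ext, x ∉ L.map Prod.fst) ∧ ext.Nodup ∧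
        (∀ f ∈ F, ∀ n ∈ pvNbrs polygons f, n ∈ L.map Prod.fst ++ ext) := by
  induction F with
  | nil => intro L c a; exact ⟨[], by simp, by simp, by simp, by simp, by simp, by simp⟩
  | cons f F ih =>
    intro L c a
    simp only [List.map_cons, List.foldl_cons, satItem, pvInner, if_pos hk]
    obtain ⟨e0, g1, g2, g3, g4, g5, g6⟩ := satStepB_corr k (pvNbrs polygons f) L c a
    rw [g1, g2]
    have hkey : L.map Prod.fst ++ e0 = (L ++ e0.map (fun n => (n, k + 1))).map Prod.fst := by
      simp [Function.comp_def]
    rw [hkey]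
    obtain ⟨e1, h1, h2, h3, h4, h5, h6⟩ := ih (L ++ e0.map (fun n => (n, k + 1)))
      (c || !e0.isEmpty) (a ++ e0)
    refine ⟨e0 ++ e1, ?_, ?_, ?_, ?_, ?_, ?_⟩
    · rw [h1]
      simp only [List.map_append, List.append_assoc]
      cases e0 <;> cases e1 <;> simp
    · rw [h2]
      simp [← hkey]
    · intro x hx
      rcases List.mem_append.mp hx with h' | h'
      · exact pvNbrs_sub polygons f x (g3 x h')
      · exact h3 x h'
    · intro x hx
      rcases List.mem_append.mp hx with h' | h'
      · exact g4 x h'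
      · intro hxl
        exact h4 x h' (by rw [← hkey]; exact List.mem_append_left _ hxl)
    · refine List.Nodup.append g5 h5 (List.disjoint_right.mpr ?_)
      intro x hx1 hx0
      exact h4 x hx1 (by rw [← hkey]; exact List.mem_append_right _ hx0)
    · intro g hg n hn
      rcases List.mem_cons.mp hg with rfl | hg'
      · have := g6 n hn
        rw [← List.append_assoc]
        exact List.mem_append_left _ this
      · have := h6 g hg' n hn
        rw [← hkey] at this
        simpa [List.append_assoc] using this
  
theorem pv_ofList_nodup (xs : List Int) (h : xs.Nodup) : PySem.Set.ofList xs = xs := by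
  have h2 := PySem.Set.update_eq_append_of_disjoint (s := ([] : List Int)) (xs := xs) h
    (by intro x hx; simp)
  rw [← PySem.Set.update_nil_left, h2]
  simp

-- the bridge: if every already-relaxed pair of P is saturated relative to the current keys,
-- A's BFS from the frontier F at depth k computes exactly the keys of B's saturation
theorem pv_bridge (polygons : List (Int × List (String × List Int))) (max_dist : Int)
    (N : Nat) :
    ∀ (P : List (Int × Int)) (F : List Int) (k : Int),
      ((pvNodes polygons).filter
          (fun x => decide (x ∉ (P.map Prod.fst ++ F)))).length ≤ N →
      (∀ p ∈ P, p.2 < max_dist → ∀ n ∈ pvNbrs polygons p.1, n ∈ P.map Prod.fst ++ F) →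
      (P.map Prod.fst ++ F).Nodup →
      loopA polygons max_dist (P.map Prod.fst ++ F) (F.map (fun f => (f, k))) =
        (loopSat polygons max_dist (P ++ F.map (fun f => (f, k)))).map Prod.fst ∧
      ((loopSat polygons max_dist (P ++ F.map (fun f => (f, k)))).map Prod.fst).Nodup := by
  induction N using Nat.strong_induction_on with
  | _ N ih =>
    intro P F k hN hsat hnd
    have hkeys : (P ++ F.map (fun f => (f, k))).map Prod.fst = P.map Prod.fst ++ F := by
      simp [Function.comp_def]
    by_cases hk : k < max_dist
    · -- split one relaxation pass: noop over P, then the frontier expansion over F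
      have hP : P.foldl (satItem polygons max_dist)
          (P ++ F.map (fun f => (f, k)), false) = (P ++ F.map (fun f => (f, k)), false) := by
        apply satFold_noop
        intro p hp hd n hn
        rw [hkeys]
        exact hsat p hp hd n hn
      obtain ⟨ext, h1, h2, h3, h4, h5, h6⟩ :=
        satLevel polygons max_dist k hk F (P ++ F.map (fun f => (f, k))) false []
      rw [hkeys] at h2 h4 h6
      have hfold : (P ++ F.map (fun f => (f, k))).foldl (satItem polygons max_dist)
          (P ++ F.map (fun f => (f, k)), false) =
          ((P ++ F.map (fun f => (f, k))) ++ ext.map (fun n => (n, k + 1)), !ext.isEmpty) := by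
        rw [List.foldl_append, hP, h1]
        simp
      have hA : loopA polygons max_dist (P.map Prod.fst ++ F) (F.map (fun f => (f, k))) =
          loopA polygons max_dist ((P.map Prod.fst ++ F) ++ ext)
            (ext.map (fun c => (c, k + 1))) := by
        have h0 : F.map (fun f => (f, k)) =
            F.map (fun c => (c, k)) ++ ([] : List Int).map (fun c => (c, k + 1)) := by simp
        rw [h0, pv_loopA_level polygons max_dist k hk F [] (P.map Prod.fst ++ F), h2]
        simp
      by_cases hne : ext.isEmpty = true
      · -- fixpoint: the pass changed nothing, both sides stop with the current keys
        have hext : ext = [] := by simpa using hne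
        subst hext
        rw [loopSat_eq, hfold]
        simp only [List.isEmpty_nil, Bool.not_true, Bool.false_eq_true, if_false,
          List.map_nil, List.append_nil]
        refine ⟨?_, by rw [hkeys]; exact hnd⟩
        rw [hA, hkeys]
        simp only [List.map_nil, List.append_nil]
        rw [loopA]
      · -- progress: recurse with P' = all current pairs, F' = the freshly added nodes
        have hemp : ext.isEmpty = false := by
          cases h : ext.isEmpty with
          | false => rfl
          | true => exact absurd h hne
        obtain ⟨x0, hx0⟩ := List.exists_mem_of_ne_nil ext (by simpa using hne)
        rw [loopSat_eq, hfold]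
        simp only [hemp, Bool.not_false]
        rw [if_pos trivial]
        have hfresh0 : x0 ∈ pvNodes polygons := h3 x0 hx0
        have hfresh1 : x0 ∉ P.map Prod.fst ++ F := h4 x0 hx0
        have hlt : ((pvNodes polygons).filter
            (fun x => decide (x ∉ ((P ++ F.map (fun f => (f, k))).map Prod.fst ++ ext)))).length <
            ((pvNodes polygons).filter
            (fun x => decide (x ∉ (P.map Prod.fst ++ F)))).length := by
          refine pvFilter_len_lt _ _ _ ?_ x0 hfresh0 ?_ (by simpa using hfresh1)
          · intro a ha
            simp only [decide_eq_true_eq] at ha ⊢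
            rw [hkeys] at ha
            exact fun hav => ha (List.mem_append_left _ hav)
          · simp only [decide_eq_false_iff_not, not_not, hkeys]
            exact List.mem_append_right _ hx0
        have hsat' : ∀ p ∈ P ++ F.map (fun f => (f, k)), p.2 < max_dist →
            ∀ n ∈ pvNbrs polygons p.1,
              n ∈ (P ++ F.map (fun f => (f, k))).map Prod.fst ++ ext := by
          intro p hp hd n hn
          rcases List.mem_append.mp hp with hp' | hp'
          · rw [hkeys]
            exact List.mem_append_left _ (hsat p hp' hd n hn)
          · obtain ⟨f, hf, rfl⟩ := List.mem_map.mp hp'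
            rw [hkeys]
            exact h6 f hf n hn
        have hnd' : ((P ++ F.map (fun f => (f, k))).map Prod.fst ++ ext).Nodup := by
          rw [hkeys]
          exact List.Nodup.append hnd h5 (List.disjoint_right.mpr h4)
        obtain ⟨ihA, ihN⟩ := ih _ (Nat.lt_of_lt_of_le hlt hN)
          (P ++ F.map (fun f => (f, k))) ext (k + 1) (le_refl _) hsat' hnd'
        rw [hkeys] at ihA
        refine ⟨?_, ihN⟩
        rw [hA, ihA]
    · -- k ≥ max_dist: the whole pass is a noop and A's queue drains without expanding
      have hfold : (P ++ F.map (fun f => (f, k))).foldl (satItem polygons max_dist)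
          (P ++ F.map (fun f => (f, k)), false) = (P ++ F.map (fun f => (f, k)), false) := by
        apply satFold_noop
        intro p hp hd n hn
        rcases List.mem_append.mp hp with hp' | hp'
        · rw [hkeys]
          exact hsat p hp' hd n hn
        · obtain ⟨f, hf, rfl⟩ := List.mem_map.mp hp'
          exact absurd hd hk
      rw [loopSat_eq, hfold]
      simp only [Bool.false_eq_true, if_false]
      rw [hkeys]
      exact ⟨pv_loopA_dead polygons max_dist k hk F (P.map Prod.fst ++ F), hnd⟩

-- ===== VERDICT (by name: the statement is the Claim_ definition above) =====
theorem get_polys_within_distance_jump_spec : Claim_equal_get_polys_within_distance_jump := by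
  intro polygons start max_dist _
  unfold Spec_get_polys_within_distance_jump
  unfold get_polys_within_distance_jump get_polys_within_distance_jump_alt
  obtain ⟨hA, hN⟩ := pv_bridge polygons max_dist
    ((pvNodes polygons).filter (fun x => decide (x ∉ ([] : List (Int × Int)).map Prod.fst ++ [start]))).length
    [] [start] 0 (le_refl _) (by simp) (by simp)
  have hstart : PySem.Set.ofList [start] = [start] := rfl
  rw [hstart]
  have h1 : ([(start, 0)] : List (Int × Int)) = [start].map (fun f => (f, (0 : Int))) := rfl
  rw [h1]
  simp only [List.map_nil, List.nil_append] at hA hN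
  rw [hA, pv_ofList_nodup _ hN]
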